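-- pv_equiv track=rewrite | github.com/runpod/flash | src/runpod_flash/core/resources/worker_availability_diagnostic.py | _summarize_stock_signal
-- ===== SOURCE A (Python) =====
-- from typing import Any, Dict, List, Optional, Tuple, TYPE_CHECKING
--
-- def _summarize_stock_signal(
--     availability_by_location: Dict[str, Optional[str]],
-- ) -> str:
--     non_empty = [status for status in availability_by_location.values() if status]
--     if not non_empty:
--         return "unknown"
--
--     priority = {"High": 3, "Medium": 2, "Low": 1}
--     best = max(non_empty, key=lambda status: priority.get(status, 0))
--     return best
-- ===== SOURCE B (Python) =====
-- def _summarize_stock_signal(availability_by_location):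
--     values = [s for s in availability_by_location.values() if s]
--     if not values:
--         return "unknown"
--     for level in ("High", "Medium", "Low"):
--         if level in values:
--             return level
--     return values[0]
-- ===== Notes on version B (the rewrite author's own statement) =====
-- stated objective: idiomatic
-- what changed: Replaces the reduce-with-max-over-a-priority-dict by probing the priority levels in rank order and returning the first one present, falling back to the first truthy value for unknown statuses.
import Mathlib
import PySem

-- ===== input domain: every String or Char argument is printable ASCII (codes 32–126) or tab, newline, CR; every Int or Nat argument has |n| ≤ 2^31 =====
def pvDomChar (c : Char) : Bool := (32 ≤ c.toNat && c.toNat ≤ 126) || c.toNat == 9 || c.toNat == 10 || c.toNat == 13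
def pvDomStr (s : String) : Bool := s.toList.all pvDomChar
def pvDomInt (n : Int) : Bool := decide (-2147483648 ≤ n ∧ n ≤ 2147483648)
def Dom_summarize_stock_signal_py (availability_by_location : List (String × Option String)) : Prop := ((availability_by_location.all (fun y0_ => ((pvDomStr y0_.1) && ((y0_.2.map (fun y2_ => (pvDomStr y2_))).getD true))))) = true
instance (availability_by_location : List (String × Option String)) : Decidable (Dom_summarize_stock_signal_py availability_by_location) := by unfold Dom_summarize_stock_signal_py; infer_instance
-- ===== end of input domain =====

-- One honest line: B probes the priority levels in rank order instead of reducing with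
-- max over a priority dict; same O(n) cost, more idiomatic.

-- Both Pythons start with the identical comprehension
-- '[s for s in availability_by_location.values() if s]' (truthy = non-None, non-empty):
def pvTruthyValues (availability_by_location : List (String × Option String)) : List String :=
  (availability_by_location.map Prod.snd).filterMap
    (fun o => match o with
      | some s => if s = "" then none else some s
      | none => none)

-- ===== PORT A =====
def summarize_stock_signal_py (availability_by_location : List (String × Option String)) : String :=
  let non_empty := pvTruthyValues availability_by_location
  if non_empty = [] then "unknown"
  else
    -- best = max(non_empty, key=lambda status: priority.get(status, 0)); non_empty ≠ [] so getD is never the default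
    (PySem.List.max? non_empty
      (fun status => PySem.Dict.getD (PySem.Dict.ofList [("High", (3 : Int)), ("Medium", 2), ("Low", 1)]) status 0)).getD "unknown"

-- ===== PORT B =====
def summarize_stock_signal_py_alt (availability_by_location : List (String × Option String)) : String :=
  let values := pvTruthyValues availability_by_location
  if values = [] then "unknown"
  else
    match ["High", "Medium", "Low"].find? (fun level => values.contains level) with
    | some level => level
    | none => values.headD "unknown"   -- values[0]; values is non-empty here

-- ===== PRECONDITION & SPEC =====
def Spec_summarize_stock_signal_py (availability_by_location : List (String × Option String)) (out : String) : Prop := out = summarize_stock_signal_py_alt availability_by_location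
instance (availability_by_location : List (String × Option String)) (out : String) : Decidable (Spec_summarize_stock_signal_py availability_by_location out) := by unfold Spec_summarize_stock_signal_py; infer_instance

-- ===== CLAIM (what is proved, stated in full; the proofs are below) =====
def Claim_equal_summarize_stock_signal_py : Prop := ∀ (availability_by_location : List (String × Option String)), Dom_summarize_stock_signal_py availability_by_location → Spec_summarize_stock_signal_py availability_by_location (summarize_stock_signal_py availability_by_location)

-- ===== LEMMAS AND PROOFS =====

-- plain form of the priority key
def pvPrio (s : String) : Int :=
  if s = "High" then 3 else if s = "Medium" then 2 else if s = "Low" then 1 else 0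

theorem pvPrio_eq (s : String) :
    PySem.Dict.getD (PySem.Dict.ofList [("High", (3 : Int)), ("Medium", 2), ("Low", 1)]) s 0 = pvPrio s := by
  have hd : PySem.Dict.ofList [("High", (3 : Int)), ("Medium", 2), ("Low", 1)]
      = PySem.Dict.mk [("High", 3), ("Medium", 2), ("Low", 1)] := rfl
  rw [hd]
  simp only [PySem.Dict.getD, PySem.Dict.get?, List.find?, pvPrio]
  by_cases h1 : s = "High"
  · simp [h1]
  · by_cases h2 : s = "Medium"
    · simp [h2]
    · by_cases h3 : s = "Low"
      · simp [h3]
      · simp [h1, h2, h3, beq_eq_false_iff_ne.mpr (Ne.symm h1),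
          beq_eq_false_iff_ne.mpr (Ne.symm h2), beq_eq_false_iff_ne.mpr (Ne.symm h3)]

-- characterization of the first-wins running max by priority
def pvChar (b : String) (rest : List String) : String :=
  if b = "High" ∨ "High" ∈ rest then "High"
  else if b = "Medium" ∨ "Medium" ∈ rest then "Medium"
  else if b = "Low" ∨ "Low" ∈ rest then "Low"
  else b

set_option maxRecDepth 8000 in
theorem pvChar_cons (b h : String) (t : List String) :
    pvChar (if pvPrio b < pvPrio h then h else b) t = pvChar b (h :: t) := by
  by_cases hb1 : b = "High" <;> by_cases hh1 : h = "High" <;>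
  by_cases hb2 : b = "Medium" <;> by_cases hh2 : h = "Medium" <;>
  by_cases hb3 : b = "Low" <;> by_cases hh3 : h = "Low" <;>
    simp_all [pvChar, pvPrio, List.mem_cons, eq_comm]

theorem pvFold_char (f : Option String → String → Option String)
    (hf : ∀ m x, f (some m) x = if pvPrio m < pvPrio x then some x else some m)
    (rest : List String) (b : String) :
    rest.foldl f (some b) = some (pvChar b rest) := by
  induction rest generalizing b with
  | nil =>
    simp only [List.foldl, pvChar]
    split_ifs with h1 h2 h3 <;> simp_all
  | cons h t ih =>
    simp only [List.foldl, hf]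
    rw [show (if pvPrio b < pvPrio h then some h else some b)
          = some (if pvPrio b < pvPrio h then h else b) by split <;> rfl]
    rw [ih, pvChar_cons]

set_option maxRecDepth 8000 in
theorem pvAlt_char (v : String) (rest : List String) :
    (match ["High", "Medium", "Low"].find? (fun level => (v :: rest).contains level) with
      | some level => level
      | none => (v :: rest).headD "unknown") = pvChar v rest := by
  by_cases h1 : v = "High" ∨ ("High" : String) ∈ rest <;>
  by_cases h2 : v = "Medium" ∨ ("Medium" : String) ∈ rest <;>
  by_cases h3 : v = "Low" ∨ ("Low" : String) ∈ rest <;>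
    simp_all [pvChar, List.find?, List.mem_cons, eq_comm]

-- ===== VERDICT (by name: the statement is the Claim_ definition above) =====
theorem summarize_stock_signal_py_spec : Claim_equal_summarize_stock_signal_py := by
  intro l _
  unfold Spec_summarize_stock_signal_py summarize_stock_signal_py summarize_stock_signal_py_alt
  cases hv : pvTruthyValues l with
  | nil => simp
  | cons v rest =>
    simp only [if_neg (List.cons_ne_nil v rest)]
    rw [pvAlt_char]
    have hmax : PySem.List.max? (v :: rest)
        (fun status => PySem.Dict.getD (PySem.Dict.ofList [("High", (3 : Int)), ("Medium", 2), ("Low", 1)]) status 0)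
        = some (pvChar v rest) := by
      simp only [PySem.List.max?, List.foldl]
      refine pvFold_char _ (fun m x => ?_) rest v
      show (if PySem.Dict.getD (PySem.Dict.ofList [("High", (3 : Int)), ("Medium", 2), ("Low", 1)]) m 0
              < PySem.Dict.getD (PySem.Dict.ofList [("High", (3 : Int)), ("Medium", 2), ("Low", 1)]) x 0
            then some x else some m) = _
      rw [pvPrio_eq, pvPrio_eq]
    rw [hmax]
    rfl
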